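-- pv_equiv track=rewrite | github.com/KanuBang/algorithm | hash/[PGS]할인행사.py | solution
-- ===== SOURCE A (Python) =====
-- def solution(want, number, discount):
--     answer = 0
--     n = len(want)
--     dic = {}
--
--     # 1. 해쉬 테이블 만들기: key 과일 value 필요한 개수
--     for i in range(n):
--         dic[want[i]] = number[i]
--
--     # 2. discount를 10일 단위로 끊어서 배열을 만든다.
--     start = 0
--     end = 10
--
--     while end <= len(discount):
--         result = True
--         # 원본 해시가 보존을 위헤 연산은 독립적으로 복사된 해시를 이용
--         copy_dic = dict(dic)
--
--         # 할인 행사에 맞는 물품이 있다면 number -1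
--         for key in discount[start:end]:
--             if key in copy_dic:
--                 copy_dic[key] -= 1
--
--         # 할인 행사에서 원하는 물품을 다 구할 수 있는지 체크한다.
--         for key in want:
--             if copy_dic[key] != 0:
--                 result = False
--                 break
--
--         # 할인 행사에서 원하는 물픔을 다 구할 수 있다면 answer += 1
--         if result == True:
--             answer += 1
--
--         start += 1
--         end += 1
--
--     return answer
-- ===== SOURCE B (Python) =====
-- def solution(want, number, discount):
--     # Sliding window: keep per-fruit counts of the current 10-day window and a
--     # counter of how many wanted fruit types are exactly satisfied; O(D + W).
--     need = {}
--     for w, x in zip(want, number):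
--         need[w] = x
--     D = len(discount)
--     if D < 10:
--         return 0
--     cnt = {k: 0 for k in need}
--     for d in discount[:10]:
--         if d in cnt:
--             cnt[d] += 1
--     total = len(need)
--     satisfied = sum(1 for k in need if cnt[k] == need[k])
--     answer = 1 if satisfied == total else 0
--     for s in range(1, D - 9):
--         out = discount[s - 1]
--         if out in cnt:
--             if cnt[out] == need[out]:
--                 satisfied -= 1
--             cnt[out] -= 1
--             if cnt[out] == need[out]:
--                 satisfied += 1
--         inn = discount[s + 9]
--         if inn in cnt:
--             if cnt[inn] == need[inn]:
--                 satisfied -= 1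
--             cnt[inn] += 1
--             if cnt[inn] == need[inn]:
--                 satisfied += 1
--         if satisfied == total:
--             answer += 1
--     return answer
-- ===== Notes on version B (the rewrite author's own statement) =====
-- stated objective: faster
-- what changed: Replaces the per-window dict copy + decrement + re-check (O(D*W) with a fresh dict per window) by a single sliding window that incrementally updates the counts of the leaving/entering day and a satisfied-types counter, O(D + W).
import Mathlib
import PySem

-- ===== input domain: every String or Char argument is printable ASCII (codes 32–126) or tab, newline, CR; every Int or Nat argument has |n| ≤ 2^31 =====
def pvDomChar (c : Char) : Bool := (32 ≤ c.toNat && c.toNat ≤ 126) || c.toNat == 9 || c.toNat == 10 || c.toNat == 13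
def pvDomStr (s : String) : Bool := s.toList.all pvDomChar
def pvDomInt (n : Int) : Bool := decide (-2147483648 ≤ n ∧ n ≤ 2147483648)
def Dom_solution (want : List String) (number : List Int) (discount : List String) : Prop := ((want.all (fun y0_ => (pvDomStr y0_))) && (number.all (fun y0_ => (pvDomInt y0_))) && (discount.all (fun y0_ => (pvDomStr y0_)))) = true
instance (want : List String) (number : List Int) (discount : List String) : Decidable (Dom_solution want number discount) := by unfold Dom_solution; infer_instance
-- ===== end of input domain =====

-- B replaces A's per-window dict copy + decrement + re-check by a single sliding
-- window with incremental count updates and a satisfied-types counter (faster).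

-- ===== PORT A =====
-- the 'for key in want: if copy_dic[key] != 0: result = False; break' loop
-- (copy_dic[key] never raises: every element of want is a key of the dict)
def checkWant (copy : PySem.Dict String Int) : List String → Bool
  | [] => true
  | k :: rest => if copy.getD k 0 != 0 then false else checkWant copy rest

-- the 'while end <= len(discount)' loop of A
def solLoop (dic : PySem.Dict String Int) (want discount : List String)
    (start endd : Int) (answer : Int) : Int :=
  if h : endd ≤ (discount.length : Int) then
    let copy := (PySem.List.slice discount (some start) (some endd)).foldl
      (fun d key => if d.contains key then d.modify key 0 (· - 1) else d) dic
    let result := checkWant copy want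
    solLoop dic want discount (start + 1) (endd + 1)
      (if result = true then answer + 1 else answer)
  else answer
termination_by ((discount.length : Int) + 1 - endd).toNat
decreasing_by omega

def solution (want : List String) (number : List Int) (discount : List String) : Int :=
  -- dic[want[i]] = number[i]; number[i] is in range under Pre_solution
  let n := want.length
  let dic := (PySem.List.pyRange 0 (n : Int)).foldl
    (fun d i => d.insert (PySem.List.pyGetD want i "") (PySem.List.pyGetD number i 0))
    PySem.Dict.empty
  solLoop dic want discount 0 10 0

-- ===== PORT B =====
-- one iteration of B's sliding-window loop (body of 'for s in range(1, D - 9)');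
-- need[out]/need[inn] are read with getD: the guard 'out in cnt' and
-- cnt.keys = need.keys make the key present whenever it is read
def bstep (need : PySem.Dict String Int) (total : Int) (discount : List String)
    (st : PySem.Dict String Int × Int × Int) (i : Int) :
    PySem.Dict String Int × Int × Int :=
  let out := PySem.List.pyGetD discount (i - 1) ""
  let st1 :=
    if st.1.contains out then
      let s1 := if st.1.getD out 0 == need.getD out 0 then st.2.1 - 1 else st.2.1
      let c1 := st.1.modify out 0 (· - 1)
      let s2 := if c1.getD out 0 == need.getD out 0 then s1 + 1 else s1
      (c1, s2, st.2.2)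
    else st
  let inn := PySem.List.pyGetD discount (i + 9) ""
  let st2 :=
    if st1.1.contains inn then
      let s1 := if st1.1.getD inn 0 == need.getD inn 0 then st1.2.1 - 1 else st1.2.1
      let c1 := st1.1.modify inn 0 (· + 1)
      let s2 := if c1.getD inn 0 == need.getD inn 0 then s1 + 1 else s1
      (c1, s2, st1.2.2)
    else st1
  (st2.1, st2.2.1, if st2.2.1 == total then st2.2.2 + 1 else st2.2.2)

def solution_alt (want : List String) (number : List Int) (discount : List String) : Int :=
  let need := (want.zip number).foldl (fun d p => d.insert p.1 p.2) PySem.Dict.empty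
  let D := (discount.length : Int)
  if D < 10 then 0 else
    let cnt0 := need.keys.foldl (fun d k => d.insert k (0 : Int)) PySem.Dict.empty
    let cnt := (PySem.List.slice discount none (some 10)).foldl
      (fun d x => if d.contains x then d.modify x 0 (· + 1) else d) cnt0
    let total : Int := (need.size : Int)
    let sat := need.keys.foldl
      (fun s k => if cnt.getD k 0 == need.getD k 0 then s + 1 else s) (0 : Int)
    let answer : Int := if sat == total then 1 else 0
    let st := (PySem.List.pyRange 1 (D - 9)).foldl (bstep need total discount)
      (cnt, sat, answer)
    st.2.2

-- ===== PRECONDITION & SPEC =====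
-- Pre_ excludes exactly the inputs where A raises IndexError: building the dict
-- reads number[i] for every i < len(want), so len(want) ≤ len(number) is required.
def Pre_solution (want : List String) (number : List Int) (discount : List String) : Prop :=
  want.length ≤ number.length
instance (want : List String) (number : List Int) (discount : List String) : Decidable (Pre_solution want number discount) := by unfold Pre_solution; infer_instance
def pvWitness_solution : List String × List Int × List String :=
  (["a"], [1], ["a", "a", "a", "a", "a", "b", "b", "b", "b", "b", "a"])
def Spec_solution (want : List String) (number : List Int) (discount : List String) (out : Int) : Prop := out = solution_alt want number discount
instance (want : List String) (number : List Int) (discount : List String) (out : Int) : Decidable (Spec_solution want number discount out) := by unfold Spec_solution; infer_instance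

-- ===== CLAIM (what is proved, stated in full; the proofs are below) =====
def Claim_equal_solution : Prop := ∀ (want : List String) (number : List Int) (discount : List String), Dom_solution want number discount → Pre_solution want number discount → Spec_solution want number discount (solution want number discount)

-- ===== LEMMAS AND PROOFS =====

-- the needed-quantities dict (B's 'need'; under Pre_ it equals A's 'dic')
def mkNeed (want : List String) (number : List Int) : PySem.Dict String Int :=
  (want.zip number).foldl (fun d p => d.insert p.1 p.2) PySem.Dict.empty

-- the common specification: window s matches iff every wanted fruit's count in
-- discount[s:s+10] equals its needed quantity
def okWin (want : List String) (need : PySem.Dict String Int) (discount : List String)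
    (s : Nat) : Bool :=
  want.all (fun k => need.getD k 0 == ((((discount.drop s).take 10).count k : Nat) : Int))

theorem checkWant_eq (d : PySem.Dict String Int) (l : List String) :
    checkWant d l = l.all (fun k => d.getD k 0 == 0) := by
  induction l with
  | nil => rfl
  | cons k rest ih =>
    simp only [checkWant, List.all_cons, ih, bne]
    cases h : (d.getD k 0 == 0) <;> simp

-- a guarded-modify fold never changes which keys are present
theorem gmfold_contains (f : Int → Int) (w : List String)
    (d : PySem.Dict String Int) (k : String) :
    ((w.foldl (fun d x => if d.contains x then d.modify x 0 f else d) d).contains k)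
      = d.contains k := by
  induction w generalizing d with
  | nil => rfl
  | cons x w ih =>
    simp only [List.foldl_cons]
    rw [ih]
    by_cases hx : d.contains x = true
    · simp only [hx, if_true, PySem.Dict.contains_modify]
      cases hkx : (k == x) with
      | true => simp only [Bool.true_or]; exact ((beq_iff_eq.mp hkx) ▸ hx).symm
      | false => simp
    · simp [hx]

-- a guarded 'd[x] = d[x] + c' fold adds c * (count of k) to each present key
theorem gmfold_getD (f : Int → Int) (c : Int) (hf : ∀ a, f a = a + c)
    (w : List String) (d : PySem.Dict String Int) (k : String)
    (hk : d.contains k = true) :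
    ((w.foldl (fun d x => if d.contains x then d.modify x 0 f else d) d).getD k 0)
      = d.getD k 0 + c * (w.count k : Int) := by
  induction w generalizing d with
  | nil => simp
  | cons x w ih =>
    simp only [List.foldl_cons]
    by_cases hx : d.contains x = true
    · simp only [hx, if_true]
      have hk' : (d.modify x 0 f).contains k = true := by
        simp [PySem.Dict.contains_modify, hk]
      rw [ih _ hk', PySem.Dict.getD_modify]
      rw [List.count_cons]
      by_cases hkx : k = x
      · subst hkx; simp [hf]; ring
      · simp [hkx, Ne.symm hkx]
    · simp only [hx, Bool.false_eq_true, if_false]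
      have hkx : k ≠ x := by intro h; rw [h] at hk; exact hx hk
      rw [ih _ hk, List.count_cons]
      simp [Ne.symm hkx]

-- A's dict build (index loop) equals B's dict build (zip fold)
theorem build_aux (w : List String) (nm : List Int) (d : PySem.Dict String Int)
    (h : w.length ≤ nm.length) :
    (List.range w.length).foldl
      (fun d i => d.insert (w.getD i "") (nm.getD i 0)) d
      = (w.zip nm).foldl (fun d p => d.insert p.1 p.2) d := by
  induction w generalizing nm d with
  | nil => simp
  | cons a w ih =>
    cases nm with
    | nil => simp at h
    | cons b nm =>
      simp only [List.length_cons, List.range_succ_eq_map, List.foldl_cons,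
        List.foldl_map, List.zip_cons_cons]
      simp only [List.getD_cons_zero, List.getD_cons_succ]
      exact ih nm _ (by simpa using h)

theorem build_eq (want : List String) (number : List Int)
    (h : want.length ≤ number.length) :
    ((PySem.List.pyRange 0 (want.length : Int)).foldl
      (fun d i => d.insert (PySem.List.pyGetD want i "") (PySem.List.pyGetD number i 0))
      PySem.Dict.empty)
      = mkNeed want number := by
  rw [PySem.List.pyRange_zero_natCast, List.foldl_map]
  simp only [PySem.List.pyGetD_natCast]
  exact build_aux want number _ h

theorem keys_need (want : List String) (number : List Int)
    (h : want.length ≤ number.length) :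
    (mkNeed want number).keys = PySem.Set.ofList want := by
  unfold mkNeed
  rw [PySem.Dict.keys_foldl_insert_key (want.zip number) Prod.fst (fun _ p => p.2)
    PySem.Dict.empty, PySem.Dict.keys_empty, List.map_fst_zip h]
  rfl

theorem nodup_keys_need (want : List String) (number : List Int) :
    (mkNeed want number).keys.Nodup := by
  exact PySem.Dict.nodup_keys_foldl_insert_key (want.zip number) Prod.fst (fun _ p => p.2)
    PySem.Dict.empty (by simp [PySem.Dict.keys_empty])

theorem contains_need (want : List String) (number : List Int)
    (h : want.length ≤ number.length) (k : String) :
    ((mkNeed want number).contains k) = true ↔ k ∈ want := by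
  rw [PySem.Dict.contains_iff_mem_keys, keys_need want number h, PySem.Set.mem_ofList]

-- updating one element of a Nodup list changes a countP by the old/new flags
theorem countP_update {α : Type} [DecidableEq α] (l : List α) (hnd : l.Nodup)
    (x : α) (hx : x ∈ l) (p q : α → Bool) (h : ∀ y ∈ l, y ≠ x → p y = q y) :
    (l.countP q : Int)
      = (l.countP p : Int) - (if p x then 1 else 0) + (if q x then 1 else 0) := by
  induction l with
  | nil => simp at hx
  | cons a l ih =>
    rcases List.mem_cons.mp hx with rfl | hxl
    · have hpq : l.countP p = l.countP q := by
        apply List.countP_congr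
        intro y hy
        rw [h y (List.mem_cons_of_mem _ hy) (fun hyx => (List.nodup_cons.mp hnd).1 (hyx ▸ hy))]
      rw [List.countP_cons, List.countP_cons, hpq]
      push_cast
      split_ifs <;> simp_all
    · have hax : a ≠ x := fun hax => (List.nodup_cons.mp hnd).1 (hax ▸ hxl)
      have hpa : p a = q a := h a List.mem_cons_self hax
      have := ih (List.nodup_cons.mp hnd).2 hxl (fun y hy => h y (List.mem_cons_of_mem _ hy))
      rw [List.countP_cons, List.countP_cons, hpa]
      push_cast at this ⊢
      omega

-- the window shifts by one day: one element leaves, one enters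
theorem wshift (discount : List String) (s : Nat) (h : s + 11 ≤ discount.length)
    (k : String) :
    ((((discount.drop (s + 1)).take 10).count k : Nat) : Int)
      = (((discount.drop s).take 10).count k : Int)
        - (if k = discount[s]'(by omega) then 1 else 0)
        + (if k = discount[s + 10]'(by omega) then 1 else 0) := by
  have hd1 : discount.drop s = discount[s]'(by omega) :: discount.drop (s + 1) :=
    List.drop_eq_getElem_cons (by omega)
  have hd2 : (discount.drop (s + 1)).take 10
      = (discount.drop (s + 1)).take 9 ++ [discount[s + 10]'(by omega)] := by
    have h9 : (discount.drop (s + 1))[9]? = some (discount[s + 10]'(by omega)) := by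
      rw [List.getElem?_drop]
      rw [List.getElem?_eq_getElem (by omega)]
    have := List.take_add_one (l := discount.drop (s + 1)) (i := 9)
    rw [h9] at this
    simpa using this
  rw [hd1, hd2]
  rw [List.take_succ_cons, List.count_append, List.count_cons, List.count_cons]
  simp only [List.count_nil]
  by_cases h1 : k = discount[s]'(by omega) <;> by_cases h2 : k = discount[s + 10]'(by omega) <;>
    simp only [h1, h2, if_true, if_false, beq_iff_eq] <;>
    simp [eq_comm, h1, h2]


-- an 'insert k 0' fold leaves every (getD · 0) lookup at 0
theorem zerofold (l : List String) : ∀ (d : PySem.Dict String Int),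
    (∀ x, d.getD x 0 = (0 : Int)) → ∀ x,
    ((l.foldl (fun d k => d.insert k (0 : Int)) d).getD x 0) = 0 := by
  induction l with
  | nil => intro d hd x; simpa using hd x
  | cons a l ih =>
    intro d hd x
    simp only [List.foldl_cons]
    refine ih _ (fun y => ?_) x
    rw [PySem.Dict.getD_insert]
    split_ifs <;> [rfl; exact hd y]

-- B's sub-update ('if x in cnt: fix satisfied; cnt[x] = f(cnt[x]); fix satisfied')
def updD (need : PySem.Dict String Int) (x : String) (f : Int → Int)
    (c : PySem.Dict String Int × Int) : PySem.Dict String Int × Int :=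
  if c.1.contains x then
    (c.1.modify x 0 f,
     if (c.1.modify x 0 f).getD x 0 == need.getD x 0 then
       (if c.1.getD x 0 == need.getD x 0 then c.2 - 1 else c.2) + 1
     else (if c.1.getD x 0 == need.getD x 0 then c.2 - 1 else c.2))
  else c

-- bstep is two sub-updates followed by the window check
theorem bstep_eq (need : PySem.Dict String Int) (total : Int) (discount : List String)
    (st : PySem.Dict String Int × Int × Int) (i : Int) :
    bstep need total discount st i =
      ((updD need (PySem.List.pyGetD discount (i + 9) "") (· + 1)
          (updD need (PySem.List.pyGetD discount (i - 1) "") (· - 1) (st.1, st.2.1))).1,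
       (updD need (PySem.List.pyGetD discount (i + 9) "") (· + 1)
          (updD need (PySem.List.pyGetD discount (i - 1) "") (· - 1) (st.1, st.2.1))).2,
       if (updD need (PySem.List.pyGetD discount (i + 9) "") (· + 1)
          (updD need (PySem.List.pyGetD discount (i - 1) "") (· - 1) (st.1, st.2.1))).2 == total
       then st.2.2 + 1 else st.2.2) := by
  obtain ⟨c, sat, a⟩ := st
  dsimp only [bstep, updD]
  by_cases h1 : c.contains (PySem.List.pyGetD discount (i - 1) "") = true
  · simp only [if_pos h1]
    by_cases h2 : (c.modify (PySem.List.pyGetD discount (i - 1) "") 0 (· - 1)).contains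
        (PySem.List.pyGetD discount (i + 9) "") = true
    · simp only [if_pos h2]
    · simp only [if_neg h2]
  · simp only [if_neg h1]
    by_cases h2 : c.contains (PySem.List.pyGetD discount (i + 9) "") = true
    · simp only [if_pos h2]
    · simp only [if_neg h2]

-- the sub-update keeps cnt's keys, keeps 'sat counts the satisfied keys',
-- and changes only the count of x (by f, when x is tracked)
theorem updD_inv (need : PySem.Dict String Int) (x : String) (f : Int → Int)
    (hnd : need.keys.Nodup) (c : PySem.Dict String Int × Int)
    (hc : ∀ k, c.1.contains k = need.contains k)
    (hsat : c.2 = ((need.keys.countP (fun k => c.1.getD k 0 == need.getD k 0) : Nat) : Int)) :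
    (∀ k, (updD need x f c).1.contains k = need.contains k) ∧
    ((updD need x f c).2
      = ((need.keys.countP (fun k => (updD need x f c).1.getD k 0 == need.getD k 0) : Nat) : Int)) ∧
    (∀ k, k ≠ x → (updD need x f c).1.getD k 0 = c.1.getD k 0) ∧
    ((updD need x f c).1.getD x 0
      = if need.contains x = true then f (c.1.getD x 0) else c.1.getD x 0) := by
  by_cases hx : c.1.contains x = true
  · have hnx : need.contains x = true := (hc x) ▸ hx
    have hxk : x ∈ need.keys := (PySem.Dict.contains_iff_mem_keys need x).mp hnx
    have hcp := countP_update need.keys hnd x hxk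
      (fun k => c.1.getD k 0 == need.getD k 0)
      (fun k => (c.1.modify x 0 f).getD k 0 == need.getD k 0)
      (fun y _ hyx => by
        show (c.1.getD y 0 == need.getD y 0) = ((c.1.modify x 0 f).getD y 0 == need.getD y 0)
        rw [PySem.Dict.getD_modify]; simp [hyx])
    simp only [updD, hx, if_true]
    refine ⟨?_, ?_, ?_, ?_⟩
    · intro k
      rw [PySem.Dict.contains_modify]
      by_cases hkx : k = x
      · subst hkx; simp [hnx]
      · simp [beq_iff_eq, hkx, hc k]
    · rw [hcp, ← hsat]
      split_ifs <;> omega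
    · intro k hk
      rw [PySem.Dict.getD_modify]
      simp [hk]
    · rw [PySem.Dict.getD_modify]
      simp [hnx]
  · have hnx : need.contains x = false := by
      rw [← hc x]
      cases hcb : c.1.contains x
      · rfl
      · exact absurd hcb hx
    simp only [updD, if_neg hx]
    exact ⟨hc, hsat, fun _ _ => trivial, by simp [hnx]⟩

-- sat = total iff the current window satisfies every wanted fruit
theorem sat_total (want : List String) (number : List Int)
    (h : want.length ≤ number.length) (discount : List String) (s : Nat)
    (cnt : PySem.Dict String Int) (sat : Int)
    (hC : ∀ k, (mkNeed want number).contains k = true →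
        cnt.getD k 0 = ((((discount.drop s).take 10).count k : Nat) : Int))
    (hsat : sat = (((mkNeed want number).keys.countP
        (fun k => cnt.getD k 0 == (mkNeed want number).getD k 0) : Nat) : Int)) :
    (sat == ((mkNeed want number).size : Int))
      = okWin want (mkNeed want number) discount s := by
  have hsz : (mkNeed want number).size = (mkNeed want number).keys.length := by
    simp [PySem.Dict.size, PySem.Dict.keys]
  rw [Bool.eq_iff_iff]
  simp only [beq_iff_eq, hsat, hsz, okWin, List.all_eq_true]
  rw [Nat.cast_inj, List.countP_eq_length]
  constructor
  · intro hall k hk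
    have hco : (mkNeed want number).contains k = true := (contains_need want number h k).mpr hk
    have hkk : k ∈ (mkNeed want number).keys := (PySem.Dict.contains_iff_mem_keys _ k).mp hco
    have := hall k hkk
    simp only [beq_iff_eq] at this ⊢
    rw [← this, hC k hco]
  · intro hall k hk
    have hco : (mkNeed want number).contains k = true :=
      (PySem.Dict.contains_iff_mem_keys _ k).mpr hk
    have hkw : k ∈ want := (contains_need want number h k).mp hco
    have := hall k hkw
    simp only [beq_iff_eq] at this ⊢
    rw [hC k hco, ← this]

-- the sliding-window loop invariant
def InvB (want : List String) (number : List Int) (discount : List String) (s : Nat)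
    (st : PySem.Dict String Int × Int × Int) : Prop :=
  (∀ k, st.1.contains k = (mkNeed want number).contains k) ∧
  (∀ k, (mkNeed want number).contains k = true →
      st.1.getD k 0 = ((((discount.drop s).take 10).count k : Nat) : Int)) ∧
  st.2.1 = (((mkNeed want number).keys.countP
      (fun k => st.1.getD k 0 == (mkNeed want number).getD k 0) : Nat) : Int) ∧
  st.2.2 = (((List.range (s + 1)).countP
      (okWin want (mkNeed want number) discount) : Nat) : Int)

theorem bstep_inv (want : List String) (number : List Int) (discount : List String)
    (h : want.length ≤ number.length) (s : Nat) (hs : s + 11 ≤ discount.length)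
    (st : PySem.Dict String Int × Int × Int) (hst : InvB want number discount s st) :
    InvB want number discount (s + 1)
      (bstep (mkNeed want number) ((mkNeed want number).size : Int) discount st ((s : Int) + 1)) := by
  obtain ⟨hc, hw, hsat, hans⟩ := hst
  have hout : PySem.List.pyGetD discount ((s : Int) + 1 - 1) "" = discount[s]'(by omega) := by
    have he : (s : Int) + 1 - 1 = ((s : Nat) : Int) := by ring
    rw [he, PySem.List.pyGetD_natCast, List.getD_eq_getElem _ _ (by omega)]
  have hinn : PySem.List.pyGetD discount ((s : Int) + 1 + 9) "" = discount[s + 10]'(by omega) := by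
    have he : (s : Int) + 1 + 9 = ((s + 10 : Nat) : Int) := by push_cast; ring
    rw [he, PySem.List.pyGetD_natCast, List.getD_eq_getElem _ _ (by omega)]
  have hnd := nodup_keys_need want number
  obtain ⟨hc1, hsat1, hoff1, hat1⟩ :=
    updD_inv (mkNeed want number) (discount[s]'(by omega)) (· - 1) hnd (st.1, st.2.1) hc hsat
  obtain ⟨hc2, hsat2, hoff2, hat2⟩ :=
    updD_inv (mkNeed want number) (discount[s + 10]'(by omega)) (· + 1) hnd
      (updD (mkNeed want number) (discount[s]'(by omega)) (· - 1) (st.1, st.2.1)) hc1 hsat1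
  have hw2 : ∀ k, (mkNeed want number).contains k = true →
      (updD (mkNeed want number) (discount[s + 10]'(by omega)) (· + 1)
        (updD (mkNeed want number) (discount[s]'(by omega)) (· - 1) (st.1, st.2.1))).1.getD k 0
      = ((((discount.drop (s + 1)).take 10).count k : Nat) : Int) := by
    intro k hk
    rw [wshift discount s hs k]
    have e1 : (updD (mkNeed want number) (discount[s]'(by omega)) (· - 1) (st.1, st.2.1)).1.getD k 0
        = st.1.getD k 0 - (if k = discount[s]'(by omega) then 1 else 0) := by
      by_cases hk1 : k = discount[s]'(by omega)
      · rw [← hk1] at hat1 ⊢; rw [hat1]; simp [hk]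
      · rw [hoff1 k hk1]; simp [hk1]
    have e2 : (updD (mkNeed want number) (discount[s + 10]'(by omega)) (· + 1)
          (updD (mkNeed want number) (discount[s]'(by omega)) (· - 1) (st.1, st.2.1))).1.getD k 0
        = (updD (mkNeed want number) (discount[s]'(by omega)) (· - 1) (st.1, st.2.1)).1.getD k 0
          + (if k = discount[s + 10]'(by omega) then 1 else 0) := by
      by_cases hk2 : k = discount[s + 10]'(by omega)
      · rw [← hk2] at hat2 ⊢; rw [hat2]; simp [hk, e1]
      · rw [hoff2 k hk2]; simp [hk2]
    rw [e2, e1, hw k hk]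
  rw [bstep_eq, hout, hinn]
  refine ⟨hc2, hw2, hsat2, ?_⟩
  have hok := sat_total want number h discount (s + 1) _ _ hw2 hsat2
  rw [hok, hans]
  have hr : List.range (s + 1 + 1) = List.range (s + 1) ++ [s + 1] := List.range_succ
  rw [hr, List.countP_append]
  cases hb : okWin want (mkNeed want number) discount (s + 1)
  · simp [hb]
  · simp [hb]

-- running B's loop from an invariant state yields the total window count
theorem bloop_eq (want : List String) (number : List Int) (discount : List String)
    (h : want.length ≤ number.length) :
    ∀ (t s : Nat) (st : PySem.Dict String Int × Int × Int),
    s + 10 + t = discount.length → InvB want number discount s st →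
    ((PySem.List.pyRange ((s : Int) + 1) ((discount.length : Int) - 9)).foldl
        (bstep (mkNeed want number) ((mkNeed want number).size : Int) discount) st).2.2
      = (((List.range (discount.length - 9)).countP
          (okWin want (mkNeed want number) discount) : Nat) : Int) := by
  intro t
  induction t with
  | zero =>
    intro s st hlen hinv
    have hnil : PySem.List.pyRange ((s : Int) + 1) ((discount.length : Int) - 9) = [] := by
      simp [PySem.List.pyRange]
      omega
    rw [hnil, List.foldl_nil, hinv.2.2.2]
    have : s + 1 = discount.length - 9 := by omega
    rw [this]
  | succ t ih =>
    intro s st hlen hinv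
    have hcons : PySem.List.pyRange ((s : Int) + 1) ((discount.length : Int) - 9)
        = ((s : Int) + 1) ::
          PySem.List.pyRange (((s : Int) + 1) + 1) ((discount.length : Int) - 9) :=
      PySem.List.pyRange_one_cons (by omega)
    rw [hcons, List.foldl_cons]
    have hstep := bstep_inv want number discount h s (by omega) st hinv
    have hrec := ih (s + 1) _ (by omega) hstep
    have hcast : ((s + 1 : Nat) : Int) + 1 = ((s : Int) + 1) + 1 := by push_cast; ring
    rw [hcast] at hrec
    exact hrec

-- A's per-window decremented copy
def winFold (dic : PySem.Dict String Int) (discount : List String) (u : Nat) :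
    PySem.Dict String Int :=
  ((discount.drop u).take 10).foldl
    (fun d key => if d.contains key then d.modify key 0 (· - 1) else d) dic

-- A's while loop counts the windows its check accepts
theorem solLoop_eq (dic : PySem.Dict String Int) (want discount : List String) :
    ∀ (t s : Nat) (ans : Int), t = discount.length - 9 - s →
    solLoop dic want discount (s : Int) ((s : Int) + 10) ans
      = ans + (((List.range' s t).countP
          (fun u => checkWant (winFold dic discount u) want) : Nat) : Int) := by
  intro t
  induction t with
  | zero =>
    intro s ans hlen
    rw [solLoop, dif_neg (by omega)]
    simp
  | succ t ih =>
    intro s ans hlen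
    rw [solLoop, dif_pos (by omega)]
    have hsl : PySem.List.slice discount (some (s : Int)) (some ((s : Int) + 10))
        = (discount.drop s).take 10 := by
      have he : ((s : Int) + 10) = ((s + 10 : Nat) : Int) := by push_cast; ring
      rw [he, PySem.List.slice_natCast]
      congr 1
      omega
    rw [hsl]
    have hc1 : ((s : Int) + 1) = ((s + 1 : Nat) : Int) := by push_cast; ring
    have hc2 : ((s : Int) + 10 + 1) = (((s + 1 : Nat)) : Int) + 10 := by push_cast; ring
    rw [hc1, hc2, ih (s + 1) _ (by omega)]
    rw [List.range'_succ, List.countP_cons]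
    show (if checkWant (winFold dic discount s) want = true then ans + 1 else ans) + _ = _
    cases hb : checkWant (winFold dic discount s) want
    · simp
    · simp
      ring

-- A's per-window check equals the window specification (when dic = mkNeed)
theorem checkA_eq (want : List String) (number : List Int) (discount : List String)
    (h : want.length ≤ number.length) (u : Nat) :
    checkWant (winFold (mkNeed want number) discount u) want
      = okWin want (mkNeed want number) discount u := by
  rw [checkWant_eq, okWin, Bool.eq_iff_iff]
  simp only [List.all_eq_true]
  have key : ∀ k ∈ want,
      ((winFold (mkNeed want number) discount u).getD k 0 == 0)
        = ((mkNeed want number).getD k 0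
            == ((((discount.drop u).take 10).count k : Nat) : Int)) := by
    intro k hk
    have hco : (mkNeed want number).contains k = true := (contains_need want number h k).mpr hk
    have := gmfold_getD (· - 1) (-1) (by intro a; ring) ((discount.drop u).take 10)
      (mkNeed want number) k hco
    rw [winFold, this, Bool.eq_iff_iff]
    simp only [beq_iff_eq]
    omega
  constructor
  · intro hall k hk; rw [← key k hk]; exact hall k hk
  · intro hall k hk; rw [key k hk]; exact hall k hk

-- A's result is the number of matching windows
theorem solution_eq_countP (want : List String) (number : List Int) (discount : List String)
    (hpre : want.length ≤ number.length) :
    solution want number discount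
      = (((List.range (discount.length - 9)).countP
          (okWin want (mkNeed want number) discount) : Nat) : Int) := by
  simp only [solution]
  rw [build_eq want number hpre]
  rw [show (0 : Int) = ((0 : Nat) : Int) from rfl,
    show (10 : Int) = ((0 : Nat) : Int) + 10 from by norm_num]
  rw [solLoop_eq (mkNeed want number) want discount (discount.length - 9) 0 _ (by omega)]
  rw [List.range_eq_range']
  rw [List.countP_congr (fun u _ => by rw [checkA_eq want number discount hpre u])]
  simp

-- B's result is the number of matching windows
theorem solution_alt_eq_countP (want : List String) (number : List Int) (discount : List String)
    (hpre : want.length ≤ number.length) :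
    solution_alt want number discount
      = (((List.range (discount.length - 9)).countP
          (okWin want (mkNeed want number) discount) : Nat) : Int) := by
  simp only [solution_alt]
  rw [show (want.zip number).foldl (fun d p => d.insert p.1 p.2)
      (PySem.Dict.empty : PySem.Dict String Int) = mkNeed want number from rfl]
  by_cases hD : (discount.length : Int) < 10
  · rw [if_pos hD, show discount.length - 9 = 0 from by omega]
    simp
  · rw [if_neg hD]
    have hsl : PySem.List.slice discount none (some 10) = (discount.drop 0).take 10 := by
      rw [PySem.List.slice_to discount (b := 10) (by norm_num)]
      simp
    rw [hsl]
    set need := mkNeed want number with hneed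
    set cnt0 := need.keys.foldl (fun d k => d.insert k (0 : Int)) PySem.Dict.empty with hcnt0
    have hcnt0z : ∀ x, cnt0.getD x 0 = 0 :=
      zerofold need.keys PySem.Dict.empty (fun x => PySem.Dict.getD_empty x 0)
    have hcnt0c : ∀ k, cnt0.contains k = need.contains k := by
      intro k
      rw [Bool.eq_iff_iff, PySem.Dict.contains_iff_mem_keys, PySem.Dict.contains_iff_mem_keys]
      have hk : cnt0.keys = PySem.Set.ofList need.keys := by
        have h1 := PySem.Dict.keys_foldl_insert need.keys
          (fun _ _ => (0 : Int)) PySem.Dict.empty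
        rw [PySem.Dict.keys_empty] at h1
        exact h1
      rw [hk]
      exact PySem.Set.mem_ofList need.keys k
    set cnt := ((discount.drop 0).take 10).foldl
      (fun d x => if d.contains x then d.modify x 0 (· + 1) else d) cnt0 with hcnt
    have hcc : ∀ k, cnt.contains k = need.contains k :=
      fun k => (gmfold_contains (· + 1) _ cnt0 k).trans (hcnt0c k)
    have hcw : ∀ k, need.contains k = true →
        cnt.getD k 0 = ((((discount.drop 0).take 10).count k : Nat) : Int) := by
      intro k hk
      rw [hcnt, gmfold_getD (· + 1) 1 (fun a => rfl) ((discount.drop 0).take 10) cnt0 k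
        (by rw [hcnt0c k]; exact hk), hcnt0z k]
      ring
    set satv := need.keys.foldl
      (fun s k => if cnt.getD k 0 == need.getD k 0 then s + 1 else s) (0 : Int) with hsatv
    have hsat0 : satv
        = ((need.keys.countP (fun k => cnt.getD k 0 == need.getD k 0) : Nat) : Int) := by
      rw [hsatv, PySem.List.foldl_if_add_one]
      simp
    have hans0 : (if satv == (need.size : Int) then (1 : Int) else 0)
        = (((List.range (0 + 1)).countP (okWin want need discount) : Nat) : Int) := by
      rw [sat_total want number hpre discount 0 cnt satv hcw hsat0]
      cases hb : okWin want need discount 0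
      · simp [hb]
      · simp [hb]
    have hinv : InvB want number discount 0
        (cnt, satv, if satv == (need.size : Int) then (1 : Int) else 0) :=
      ⟨hcc, hcw, hsat0, hans0⟩
    have hbl := bloop_eq want number discount hpre (discount.length - 10) 0
      (cnt, satv, if satv == (need.size : Int) then (1 : Int) else 0) (by omega) hinv
    rw [show ((0 : Nat) : Int) + 1 = (1 : Int) from by norm_num] at hbl
    exact hbl

-- ===== VERDICT (by name: the statement is the Claim_ definition above) =====
theorem solution_spec : Claim_equal_solution := by
  intro want number discount _ hpre
  unfold Spec_solution
  rw [solution_eq_countP want number discount hpre,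
    solution_alt_eq_countP want number discount hpre]
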